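-- pv_equiv track=rewrite | github.com/ByungHakHwang/ShinkaEvolve | examples/qt_LR/qt_LR_initial.py | partition_conjugate
-- ===== SOURCE A (Python) =====
-- from typing import List, Tuple, Set
--
-- Partition = List[int]
--
-- def partition_conjugate(partition: Partition) -> Partition:
--     """
--     Compute conjugate partition (transpose Ferrers diagram).
--     Example: [4, 3, 1] -> [3, 2, 2, 1]
--     """
--     if not partition:
--         return []
--     conj = []
--     max_val = partition[0]
--     for c in range(max_val):
--         col_height = sum(1 for row_len in partition if row_len > c)
--         conj.append(col_height)
--     return conj
-- ===== SOURCE B (Python) =====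
-- def partition_conjugate(partition):
--     """Conjugate partition via frequency counts of row lengths + suffix sums (O(n + m))."""
--     if not partition:
--         return []
--     m = partition[0]
--     if m <= 0:
--         return []
--     freq = [0] * (m + 1)
--     for row in partition:
--         if row > 0:
--             freq[min(row, m)] += 1
--     conj = []
--     running = 0
--     for c in range(m - 1, -1, -1):
--         running += freq[c + 1]
--         conj.append(running)
--     conj.reverse()
--     return conj
-- ===== Notes on version B (the rewrite author's own statement) =====
-- stated objective: faster
-- what changed: Instead of scanning the whole partition once per column, B builds a frequency table of (clamped) row lengths in one pass and obtains each column height as a backward running suffix sum.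
import Mathlib
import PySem

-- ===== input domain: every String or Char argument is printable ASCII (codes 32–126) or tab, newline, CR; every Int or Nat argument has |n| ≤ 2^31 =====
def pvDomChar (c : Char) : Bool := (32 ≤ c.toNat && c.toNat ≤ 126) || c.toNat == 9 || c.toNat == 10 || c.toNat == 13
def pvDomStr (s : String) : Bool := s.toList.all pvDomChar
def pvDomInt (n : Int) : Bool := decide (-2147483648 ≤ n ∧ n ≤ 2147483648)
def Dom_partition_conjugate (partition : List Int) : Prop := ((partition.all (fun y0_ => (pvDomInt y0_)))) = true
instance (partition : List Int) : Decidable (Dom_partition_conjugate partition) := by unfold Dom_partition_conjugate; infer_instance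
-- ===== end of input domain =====

-- B replaces A's per-column scan of the whole partition by a one-pass frequency count of
-- (clamped) row lengths followed by a backward running suffix sum (faster in a timing run).

-- ===== PORT A =====
def partition_conjugate (partition : List Int) : List Int :=
  if partition = [] then []
  else
    let max_val := partition.headI
    (PySem.List.pyRange 0 max_val 1).foldl
      (fun conj c =>
        let col_height : Int :=
          partition.foldl (fun acc row_len => if row_len > c then acc + 1 else acc) 0
        conj ++ [col_height]) []

-- ===== PORT B =====
def partition_conjugate_alt (partition : List Int) : List Int :=
  if partition = [] then []
  else
    let m := partition.headI
    if m ≤ 0 then []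
    else
      let freq0 : List Int := List.replicate (m.toNat + 1) 0
      let freq := partition.foldl
        (fun f row =>
          if row > 0 then f.set (min row m).toNat (f.getD (min row m).toNat 0 + 1) else f)
        freq0
      let p := (PySem.List.pyRange (m - 1) (-1) (-1)).foldl
        (fun (p : List Int × Int) c =>
          let running := p.2 + freq.getD (c + 1).toNat 0
          (p.1 ++ [running], running)) ([], 0)
      p.1.reverse

-- ===== PRECONDITION & SPEC =====
def Spec_partition_conjugate (partition : List Int) (out : List Int) : Prop := out = partition_conjugate_alt partition
instance (partition : List Int) (out : List Int) : Decidable (Spec_partition_conjugate partition out) := by unfold Spec_partition_conjugate; infer_instance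

-- ===== CLAIM (what is proved, stated in full; the proofs are below) =====
def Claim_equal_partition_conjugate : Prop := ∀ (partition : List Int), Dom_partition_conjugate partition → Spec_partition_conjugate partition (partition_conjugate partition)

-- ===== LEMMAS AND PROOFS =====

-- number of rows strictly longer than c (as an Int)
def pcCnt (l : List Int) (c : Int) : Int := (l.countP (fun row => decide (c < row)) : Int)

lemma pc_cnt_split (l : List Int) (c : Int) :
    pcCnt l c = pcCnt l (c + 1) + (l.countP (fun row => row == c + 1) : Int) := by
  induction l with
  | nil => simp [pcCnt]
  | cons x t ih =>
    simp only [pcCnt, List.countP_cons] at ih ⊢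
    by_cases h1 : c < x <;> by_cases h2 : c + 1 < x <;> by_cases h3 : x = c + 1 <;>
      first
      | omega
      | (simp [h1, h2, h3]; omega)

-- the frequency fold counts, at slot v, the rows with min(row, m) = v (rows ≤ 0 skipped)
lemma pc_freq_getD (m : Int) (l : List Int) :
    ∀ (f : List Int), f.length = m.toNat + 1 → ∀ v : Nat, v ≤ m.toNat →
    (l.foldl (fun f row =>
        if row > 0 then f.set (min row m).toNat (f.getD (min row m).toNat 0 + 1) else f) f).getD v 0
      = f.getD v 0 + (l.countP (fun row => decide (0 < row) && ((min row m).toNat == v)) : Int) := by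
  induction l with
  | nil => intro f hf v hv; simp
  | cons x t ih =>
    intro f hf v hv
    simp only [List.foldl_cons, List.countP_cons]
    by_cases hx : x > 0
    · have hidx : (min x m).toNat < f.length := by
        rw [hf]; omega
      rw [if_pos hx, ih _ (by simp [hf]) v hv]
      by_cases hv2 : v = (min x m).toNat
      · subst hv2
        have : (f.set (min x m).toNat (f.getD (min x m).toNat 0 + 1)).getD (min x m).toNat 0
            = f.getD (min x m).toNat 0 + 1 := by
          simp [List.getD_eq_getElem?_getD, hidx]
        rw [this]
        have hp : (decide (0 < x) && ((min x m).toNat == (min x m).toNat)) = true := by simp; omega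
        rw [hp]; simp; omega
      · have : (f.set (min x m).toNat (f.getD (min x m).toNat 0 + 1)).getD v 0 = f.getD v 0 := by
          simp [List.getD_eq_getElem?_getD, List.getElem?_set_ne (by omega : (min x m).toNat ≠ v)]
        rw [this]
        have hp : (decide (0 < x) && ((min x m).toNat == v)) = false := by simp; omega
        rw [hp]; simp
    · rw [if_neg hx, ih f hf v hv]
      have hp : (decide (0 < x) && ((min x m).toNat == v)) = false := by
        simp; intro h; omega
      rw [hp]; simp

lemma pc_pred_top (m x : Int) (hm : 0 < m) :
    (decide (0 < x) && ((min x m).toNat == m.toNat)) = decide (m - 1 < x) := by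
  rw [Bool.eq_iff_iff]
  simp only [Bool.and_eq_true, decide_eq_true_eq, beq_iff_eq]
  omega

lemma pc_pred_mid (m c x : Int) (hc : 0 ≤ c) (h : c + 1 < m) :
    (decide (0 < x) && ((min x m).toNat == (c + 1).toNat)) = (x == c + 1) := by
  rw [Bool.eq_iff_iff]
  simp only [Bool.and_eq_true, decide_eq_true_eq, beq_iff_eq]
  omega


-- B's backward loop produces the descending list of column heights
lemma pc_loop (m : Int) (f : List Int) (cntf : Int → Int)
    (Hm : f.getD m.toNat 0 = cntf (m - 1))
    (Hc : ∀ c : Int, 0 ≤ c → c + 1 < m → cntf (c + 1) + f.getD (c + 1).toNat 0 = cntf c) :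
    ∀ (k : Nat) (c : Int) (acc : List Int) (r : Int), c + 1 = (k : Int) → (k : Int) ≤ m →
    (c + 1 = m → r = 0) → (c + 1 < m → r = cntf (c + 1)) →
    (((List.range k).map (fun j : Nat => c - (j : Int))).foldl
       (fun (p : List Int × Int) x =>
         (p.1 ++ [p.2 + f.getD (x + 1).toNat 0], p.2 + f.getD (x + 1).toNat 0)) (acc, r)).1
      = acc ++ (List.range k).map (fun j : Nat => cntf (c - (j : Int))) := by
  intro k
  induction k with
  | zero => intro c acc r _ _ _ _; simp
  | succ k ih =>
    intro c acc r hck hkm h0 hr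
    have hlist : (List.range (k + 1)).map (fun j : Nat => c - (j : Int))
        = c :: (List.range k).map (fun j : Nat => (c - 1) - (j : Int)) := by
      rw [List.range_succ_eq_map]
      simp [List.map_map]
      intro a _; omega
    have hcnt : (List.range (k + 1)).map (fun j : Nat => cntf (c - (j : Int)))
        = cntf c :: (List.range k).map (fun j : Nat => cntf ((c - 1) - (j : Int))) := by
      rw [List.range_succ_eq_map]
      simp [List.map_map]
      intro a _; congr 1; omega
    rw [hlist, hcnt]
    simp only [List.foldl_cons]
    have hr' : r + f.getD (c + 1).toNat 0 = cntf c := by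
      by_cases hcm : c + 1 = m
      · rw [h0 hcm, hcm]
        rw [show cntf c = cntf (m - 1) by congr 1; omega]
        simpa using Hm
      · have hlt : c + 1 < m := by omega
        rw [hr hlt]
        exact Hc c (by omega) hlt
    rw [hr']
    have := ih (c - 1) (acc ++ [cntf c]) (cntf c)
      (by omega) (by omega)
      (by intro h; exfalso; omega)
      (by intro _; congr 1; omega)
    rw [this]; simp

lemma pc_rev_map (g : Int → Int) :
    ∀ n : Nat, ((List.range n).map (fun j : Nat => g ((n : Int) - 1 - (j : Int)))).reverse
      = (List.range n).map (fun j : Nat => g (j : Int)) := by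
  intro n
  induction n with
  | zero => simp
  | succ n ih =>
    have hfront : (List.range (n + 1)).map (fun j : Nat => g (((n : Int) + 1) - 1 - (j : Int)))
        = g (n : Int) :: (List.range n).map (fun j : Nat => g ((n : Int) - 1 - (j : Int))) := by
      rw [List.range_succ_eq_map]
      simp [List.map_map]
      intro a _; congr 1; omega
    rw [show ((n + 1 : Nat) : Int) = (n : Int) + 1 by push_cast; ring, hfront]
    simp only [List.reverse_cons, ih]
    rw [List.range_succ]
    simp

-- ===== VERDICT (by name: the statement is the Claim_ definition above) =====
theorem partition_conjugate_spec : Claim_equal_partition_conjugate := by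
  intro partition _
  show partition_conjugate partition = partition_conjugate_alt partition
  by_cases hnil : partition = []
  · simp [partition_conjugate, partition_conjugate_alt, hnil]
  · simp only [partition_conjugate, partition_conjugate_alt, if_neg hnil]
    set m := partition.headI with hm
    by_cases hm0 : m ≤ 0
    · rw [if_pos hm0, PySem.List.pyRange_one_eq_nil (by omega)]
      simp
    · rw [if_neg hm0]
      have hmpos : 0 < m := by omega
      -- A's side: map of column counts
      have hA : (PySem.List.pyRange 0 m 1).foldl
          (fun conj c =>
            conj ++ [partition.foldl (fun acc row_len => if row_len > c then acc + 1 else acc) 0]) []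
          = (List.range m.toNat).map (fun k : Nat => pcCnt partition (k : Int)) := by
        rw [PySem.List.foldl_append_singleton_eq_map
          (fun c => partition.foldl (fun acc row_len => if row_len > c then acc + 1 else acc) 0)]
        rw [PySem.List.pyRange_one 0 m]
        simp only [List.map_map, sub_zero, zero_add]
        refine List.map_congr_left ?_
        intro a _
        have := PySem.List.foldl_count_if (fun x => decide ((a : Int) < x)) partition 0
        simp only [decide_eq_true_eq] at this
        simp only [Function.comp_apply, gt_iff_lt]
        rw [this]
        simp [pcCnt]
      -- B's side
      set freq := partition.foldl
        (fun f row =>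
          if row > 0 then f.set (min row m).toNat (f.getD (min row m).toNat 0 + 1) else f)
        (List.replicate (m.toNat + 1) (0 : Int)) with hfreq
      have hflen : (List.replicate (m.toNat + 1) (0 : Int)).length = m.toNat + 1 := by simp
      have Hm : freq.getD m.toNat 0 = pcCnt partition (m - 1) := by
        rw [hfreq, pc_freq_getD m partition _ hflen m.toNat (le_refl _)]
        have : partition.countP (fun row => decide (0 < row) && ((min row m).toNat == m.toNat))
            = partition.countP (fun row => decide (m - 1 < row)) := by
          refine List.countP_congr ?_
          intro x _; rw [pc_pred_top m x hmpos]
        rw [this]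
        have hrep : (List.replicate (m.toNat + 1) (0 : Int)).getD m.toNat 0 = 0 := by
          simp only [List.getD_eq_getElem?_getD, List.getElem?_replicate]
          split <;> rfl
        rw [hrep]; simp [pcCnt]
      have Hc : ∀ c : Int, 0 ≤ c → c + 1 < m →
          pcCnt partition (c + 1) + freq.getD (c + 1).toNat 0 = pcCnt partition c := by
        intro c hc hlt
        rw [hfreq, pc_freq_getD m partition _ hflen (c + 1).toNat (by omega)]
        have : partition.countP (fun row => decide (0 < row) && ((min row m).toNat == (c + 1).toNat))
            = partition.countP (fun row => row == c + 1) := by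
          refine List.countP_congr ?_
          intro x _; rw [pc_pred_mid m c x hc hlt]
        rw [this]
        have hrep : (List.replicate (m.toNat + 1) (0 : Int)).getD (c + 1).toNat 0 = 0 := by
          simp only [List.getD_eq_getElem?_getD, List.getElem?_replicate]
          split <;> rfl
        rw [hrep]
        have hs := pc_cnt_split partition c
        omega
      have hrange : PySem.List.pyRange (m - 1) (-1) (-1)
          = (List.range m.toNat).map (fun j : Nat => (m - 1) - (j : Int)) := by
        rw [PySem.List.pyRange_neg_one]
        rw [show (m - 1 - -1).toNat = m.toNat by omega]
      have hB := pc_loop m freq (pcCnt partition) Hm Hc m.toNat (m - 1) [] 0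
        (by omega) (by omega) (fun _ => rfl) (by intro h; exfalso; omega)
      rw [hA, hrange]
      simp only [List.nil_append] at hB
      rw [hB]
      have := pc_rev_map (pcCnt partition) m.toNat
      rw [show ((m.toNat : Int)) = m by omega] at this
      exact this.symm
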